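-- pv_equiv track=rewrite | github.com/fmariezgg/algoritmos_EstructDatos_Python | 1er Corte/Asignaciones/Clase 04-30 - practica lab - EstTipoPila/ejercicio2/ordenador.py | ordena
-- ===== SOURCE A (Python) =====
-- def ordena(pila):
--     """
--     Recibe una pila (lista) de enteros y la ordena de mayor (fondo) a menor (cima),
--     usando solo operaciones de pila: pop() y append().
--     """
--     pila_aux = []
--
--     while pila:
--         # Sacamos el tope de la pila original
--         temp = pila.pop()
--
--         # Mientras la pila auxiliar tenga elementos menores, los devolvemos a la pila original
--         while pila_aux and pila_aux[-1] < temp: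
--             pila.append(pila_aux.pop())
--
--         # Colocamos temp en su lugar correcto en la pila auxiliar
--         pila_aux.append(temp)
--
--     # pila_aux tiene los elementos de mayor (fondo) a menor (top),
--     # hacemos una copia para mantener el orden
--     resultado = pila_aux.copy()
--
--     return resultado
-- ===== SOURCE B (Python) =====
-- def ordena(pila):
--     """
--     Recibe una pila (lista) de enteros y devuelve la lista ordenada de mayor a menor.
--     Selection sort by repeated max-scan; empties pila (same observable mutation as A).
--     """
--     resultado = []
--     while pila:
--         m = max(pila)
--         pila.remove(m)
--         resultado.append(m)
--     return resultado
-- ===== Notes on version B (the rewrite author's own statement) =====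
-- stated objective: simpler
-- what changed: Replaced the two-stack insertion sort (pop/push replay between pila and pila_aux) with a selection sort that repeatedly extracts max(pila) into the result.
import Mathlib
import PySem

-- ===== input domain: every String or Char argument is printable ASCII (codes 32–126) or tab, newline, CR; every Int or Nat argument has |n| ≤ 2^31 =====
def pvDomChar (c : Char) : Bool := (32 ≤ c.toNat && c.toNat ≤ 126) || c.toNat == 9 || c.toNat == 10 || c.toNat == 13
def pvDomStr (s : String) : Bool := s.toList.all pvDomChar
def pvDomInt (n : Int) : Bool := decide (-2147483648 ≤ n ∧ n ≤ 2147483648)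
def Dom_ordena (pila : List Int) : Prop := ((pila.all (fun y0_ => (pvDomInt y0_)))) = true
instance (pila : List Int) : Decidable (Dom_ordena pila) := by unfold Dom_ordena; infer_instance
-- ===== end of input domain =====

-- B replaces A's two-stack insertion sort (pop/push replay between pila and pila_aux) by a
-- selection sort that repeatedly extracts max(pila); same descending result ("simpler" objective,
-- same quadratic class but measurably faster by a constant factor: the inner scan is C-level
-- max()/remove() instead of Python-level pop/append replay). Both Pythons empty the argument
-- list in place; the equivalence proved here is about the RETURN value only.


-- ===== PORT A =====
-- Both stacks are Python lists; `pila` is kept in Python order (head = bottom, pop takes the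
-- last element), while `pila_aux` is kept head-first (head = pila_aux[-1], the top), so Python's
-- `pila_aux[-1]` / `pila_aux.pop()` / `pila_aux.append` are head operations.

-- inner while: `while pila_aux and pila_aux[-1] < temp: pila.append(pila_aux.pop())`;
-- returns (pila, pila_aux) as they stand when the loop stops.
def pvMove (pila : List Int) (pila_aux : List Int) (temp : Int) : List Int × List Int :=
  match pila_aux with
  | [] => (pila, [])
  | a :: rest => if a < temp then pvMove (pila ++ [a]) rest temp else (pila, a :: rest)

-- inversion count of a list: the termination measure of A's outer while loop
def pvInv : List Int → Nat
  | [] => 0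
  | a :: l => l.countP (fun b => decide (b < a)) + pvInv l

theorem pvMove_spec (pila_aux pila : List Int) (temp : Int) :
    pvMove pila pila_aux temp =
      (pila ++ pila_aux.takeWhile (fun a => decide (a < temp)),
       pila_aux.dropWhile (fun a => decide (a < temp))) := by
  induction pila_aux generalizing pila with
  | nil => simp [pvMove]
  | cons a rest ih =>
    by_cases h : a < temp
    · simp [pvMove, h, List.takeWhile, List.dropWhile, ih]
    · simp [pvMove, h, List.takeWhile, List.dropWhile]

theorem pvInv_append (xs ys : List Int) :
    pvInv (xs ++ ys) =
      pvInv xs + pvInv ys + (xs.map (fun x => ys.countP (fun b => decide (b < x)))).sum := by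
  induction xs with
  | nil => simp [pvInv]
  | cons a l ih => simp [pvInv, ih, List.countP_append]; omega

theorem pvInv_step_lt (p' rest : List Int) (t : Int) (S : List Int) (hS : S ≠ [])
    (hlt : ∀ s ∈ S, s < t) :
    pvInv ((p' ++ S) ++ t :: rest) < pvInv (p' ++ t :: (S ++ rest)) := by
  have hperm : ((S ++ t :: rest)).Perm (t :: (S ++ rest)) := by
    simpa using (List.perm_append_comm (l₁ := S) (l₂ := [t])).append_right rest
  have hcross : (p'.map (fun x => (S ++ t :: rest).countP (fun b => decide (b < x)))).sum
      = (p'.map (fun x => (t :: (S ++ rest)).countP (fun b => decide (b < x)))).sum := by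
    refine congrArg List.sum (List.map_congr_left ?_)
    intro x _
    exact hperm.countP_eq _
  rw [List.append_assoc, pvInv_append p' (S ++ t :: rest), pvInv_append p' (t :: (S ++ rest)),
    hcross]
  have hXX : pvInv (S ++ t :: rest) + S.length = pvInv (t :: (S ++ rest)) := by
    rw [pvInv_append]
    simp only [pvInv, List.countP_append]
    have h1 : S.countP (fun b => decide (b < t)) = S.length :=
      List.countP_eq_length.2 (fun s hs => by simpa using hlt s hs)
    have h2 : (S.map (fun x => (t :: rest).countP (fun b => decide (b < x)))).sum
        = (S.map (fun x => rest.countP (fun b => decide (b < x)))).sum := by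
      refine congrArg List.sum (List.map_congr_left ?_)
      intro s hs
      simp [not_lt.2 (le_of_lt (hlt s hs))]
    rw [pvInv_append, h1, h2]
    omega
  have hSlen : 0 < S.length := List.length_pos_iff.2 hS
  omega

-- outer while: `while pila: temp = pila.pop(); <inner while>; pila_aux.append(temp)`
def pvLoop (pila : List Int) (pila_aux : List Int) : List Int :=
  if h : pila = [] then pila_aux
  else
    let temp := pila.getLast h
    let res := pvMove pila.dropLast pila_aux temp
    pvLoop res.1 (temp :: res.2)
termination_by (pvInv (pila ++ pila_aux), pila.length)
decreasing_by
  rw [pvMove_spec]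
  set t := pila.getLast h with ht
  set S := pila_aux.takeWhile (fun a => decide (a < t))
  set rest := pila_aux.dropWhile (fun a => decide (a < t))
  have hsplit : pila = pila.dropLast ++ [t] := by
    simpa [ht] using (List.dropLast_append_getLast h).symm
  have haux : pila_aux = S ++ rest := (List.takeWhile_append_dropWhile).symm
  have hlt : ∀ s ∈ S, s < t := by
    intro s hs
    have := List.mem_takeWhile_imp hs
    simpa using this
  rcases eq_or_ne S [] with hSnil | hSne
  · apply Prod.Lex.right'
    · have hEq : (pila.dropLast ++ S) ++ t :: rest = pila ++ pila_aux := by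
        conv_rhs => rw [hsplit, haux, hSnil]
        simp [hSnil]
      exact le_of_eq (by rw [hEq])
    · have hp : 0 < pila.length := List.length_pos_iff.2 h
      simp [hSnil, List.length_dropLast]
      omega
  · apply Prod.Lex.left
    have h1 : pila ++ pila_aux = pila.dropLast ++ t :: (S ++ rest) := by
      conv_lhs => rw [hsplit, haux]
      simp
    rw [h1]
    exact pvInv_step_lt pila.dropLast rest t S hSne hlt

-- Python returns `resultado = pila_aux.copy()` bottom-first; with the head-first representation
-- of the auxiliary stack that value is the reverse of the final stack.
def ordena (pila : List Int) : List Int :=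
  (pvLoop pila []).reverse

-- ===== PORT B =====
-- `while pila: m = max(pila); pila.remove(m); resultado.append(m)`
def pvSelect (pila : List Int) (resultado : List Int) : List Int :=
  match hm : PySem.List.max? pila (fun x => x) with
  | none => resultado
  | some m =>
    match hr : PySem.List.remove? pila m with
    | none => resultado  -- unreachable: the max is a member, Python's remove cannot raise here
    | some p' => pvSelect p' (resultado ++ [m])
termination_by pila.length
decreasing_by
  have hmem : m ∈ pila := PySem.List.max?_mem hm
  rw [PySem.List.remove?_eq_some_erase pila m hmem] at hr
  cases hr
  have h1 := List.length_erase_of_mem hmem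
  have h2 : 0 < pila.length := List.length_pos_iff.2 (by rintro rfl; simp at hmem)
  omega

def ordena_alt (pila : List Int) : List Int :=
  pvSelect pila []

-- ===== PRECONDITION & SPEC =====
def Spec_ordena (pila : List Int) (out : List Int) : Prop := out = ordena_alt pila
instance (pila : List Int) (out : List Int) : Decidable (Spec_ordena pila out) := by unfold Spec_ordena; infer_instance

-- ===== CLAIM (what is proved, stated in full; the proofs are below) =====
def Claim_equal_ordena : Prop := ∀ (pila : List Int), Dom_ordena pila → Spec_ordena pila (ordena pila)

-- ===== LEMMAS AND PROOFS =====

-- Every element surviving the inner while's pops is ≥ temp, given the auxiliary stack is ordered.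
theorem pv_dropWhile_ge (t : Int) (l : List Int) (hs : l.Pairwise (· ≤ ·)) :
    ∀ x ∈ l.dropWhile (fun a => decide (a < t)), t ≤ x := by
  induction l with
  | nil => simp
  | cons a r ih =>
    intro x hx
    by_cases h : a < t
    · exact ih (List.pairwise_cons.1 hs).2 x (by simpa [List.dropWhile, h] using hx)
    · simp only [List.dropWhile, h, decide_false] at hx
      rcases List.mem_cons.1 hx with rfl | hx
      · exact not_lt.1 h
      · exact le_trans (not_lt.1 h) ((List.pairwise_cons.1 hs).1 x hx)

-- One outer-loop step only rearranges the two stacks' contents.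
theorem pv_perm_shuffle (p S rest : List Int) (t : Int) :
    ((p ++ S) ++ t :: rest).Perm (p ++ t :: (S ++ rest)) := by
  have h1 : S ++ t :: rest = (S ++ [t]) ++ rest := by simp
  have h2 : ((S ++ [t]) ++ rest).Perm (t :: (S ++ rest)) := by
    simpa using (List.perm_append_comm (l₁ := S) (l₂ := [t])).append_right rest
  rw [List.append_assoc, h1]
  exact h2.append_left p

-- Invariant of A's outer loop: with a ≤-ordered (head = top = smallest) auxiliary stack, the
-- loop returns a ≤-ordered permutation of everything on both stacks.
theorem pvLoop_pairwise_perm : ∀ (pila pila_aux : List Int), pila_aux.Pairwise (· ≤ ·) →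
    (pvLoop pila pila_aux).Pairwise (· ≤ ·) ∧ (pvLoop pila pila_aux).Perm (pila ++ pila_aux) := by
  intro pila pila_aux
  induction pila, pila_aux using pvLoop.induct with
  | case1 pila_aux =>
    intro hs
    rw [pvLoop]
    simp [hs]
  | case2 pila pila_aux h temp res ih =>
    intro hs
    have htemp : temp = pila.getLast h := rfl
    have hres : res = pvMove pila.dropLast pila_aux temp := rfl
    clear_value temp res
    subst hres
    subst htemp
    rw [pvLoop, dif_neg h]
    simp only [pvMove_spec] at ih ⊢
    have hrest_pw : (pila_aux.dropWhile
        (fun a => decide (a < pila.getLast h))).Pairwise (· ≤ ·) :=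
      List.Pairwise.sublist (List.dropWhile_sublist _) hs
    have hhead := pv_dropWhile_ge (pila.getLast h) pila_aux hs
    have hs' : (pila.getLast h ::
        pila_aux.dropWhile (fun a => decide (a < pila.getLast h))).Pairwise (· ≤ ·) :=
      List.pairwise_cons.2 ⟨hhead, hrest_pw⟩
    obtain ⟨ihp, ihperm⟩ := ih hs'
    refine ⟨ihp, ihperm.trans ?_⟩
    have hsplit : pila.dropLast ++ [pila.getLast h] = pila := List.dropLast_append_getLast h
    have haux : pila_aux = pila_aux.takeWhile (fun a => decide (a < pila.getLast h)) ++
        pila_aux.dropWhile (fun a => decide (a < pila.getLast h)) :=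
      List.takeWhile_append_dropWhile.symm
    have hgoal : pila ++ pila_aux = pila.dropLast ++ pila.getLast h ::
        (pila_aux.takeWhile (fun a => decide (a < pila.getLast h)) ++
         pila_aux.dropWhile (fun a => decide (a < pila.getLast h))) := by
      conv_lhs => rw [← hsplit, haux]
      simp
    rw [hgoal]
    exact pv_perm_shuffle _ _ _ _

-- Invariant of B's loop: resultado is ≥-ordered and dominates everything still in pila.
theorem pvSelect_pairwise_perm : ∀ (pila resultado : List Int),
    resultado.Pairwise (· ≥ ·) → (∀ y ∈ resultado, ∀ x ∈ pila, x ≤ y) →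
    (pvSelect pila resultado).Pairwise (· ≥ ·) ∧
      (pvSelect pila resultado).Perm (resultado ++ pila) := by
  intro pila resultado
  induction pila, resultado using pvSelect.induct with
  | case1 pila resultado hm =>
    intro hs _
    have hnil : pila = [] := (PySem.List.max?_eq_none_iff pila _).1 hm
    subst hnil
    rw [pvSelect]
    split
    · simpa using hs
    · next m heq => rw [hm] at heq; cases heq
  | case2 pila resultado m hm hr =>
    intro _ _
    exact absurd (PySem.List.max?_mem hm) ((PySem.List.remove?_eq_none_iff pila m).1 hr)
  | case3 pila resultado m hm p' hr ih =>
    intro hs hinv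
    have hmem : m ∈ pila := PySem.List.max?_mem hm
    have hmax : ∀ x ∈ pila, x ≤ m := fun x hx => by
      simpa using PySem.List.max?_isMax hm x hx
    have hp' : p' = pila.erase m := by
      have h1 := PySem.List.remove?_eq_some_erase pila m hmem
      rw [h1] at hr
      exact (Option.some.inj hr).symm
    have hs' : (resultado ++ [m]).Pairwise (· ≥ ·) :=
      List.pairwise_append.2 ⟨hs, by simp, by
        intro a ha b hb
        rcases List.mem_singleton.1 hb with rfl
        exact hinv a ha b hmem⟩
    have hinv' : ∀ y ∈ resultado ++ [m], ∀ x ∈ p', x ≤ y := by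
      intro y hy x hx
      have hxp : x ∈ pila := by
        rw [hp'] at hx; exact List.mem_of_mem_erase hx
      rcases List.mem_append.1 hy with hy | hy
      · exact hinv y hy x hxp
      · rcases List.mem_singleton.1 hy with rfl
        exact hmax x hxp
    obtain ⟨ihp, ihperm⟩ := ih hs' hinv'
    rw [pvSelect]
    split
    · next heq => rw [hm] at heq; cases heq
    · next m2 heq =>
      rw [hm] at heq
      rcases Option.some.inj heq with rfl
      split
      · next heq2 => rw [hr] at heq2; cases heq2
      · next p2 heq2 =>
        rw [hr] at heq2
        rcases Option.some.inj heq2 with rfl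
        refine ⟨ihp, ihperm.trans ?_⟩
        have h1 : pila.Perm (m :: pila.erase m) := List.perm_cons_erase hmem
        have h2 : (resultado ++ [m]) ++ p' = resultado ++ (m :: pila.erase m) := by
          rw [hp']; simp
        rw [h2]
        exact (h1.append_left resultado).symm

-- ===== VERDICT (by name: the statement is the Claim_ definition above) =====
theorem ordena_spec : Claim_equal_ordena := by
  intro pila _
  unfold Spec_ordena ordena ordena_alt
  obtain ⟨hls, hlp⟩ := pvLoop_pairwise_perm pila [] (by simp)
  obtain ⟨hss, hsp⟩ := pvSelect_pairwise_perm pila [] (by simp) (by simp)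
  have hperm : (pvLoop pila []).reverse.Perm (pvSelect pila []) := by
    refine ((pvLoop pila []).reverse_perm.trans hlp).trans ?_
    simpa using hsp.symm
  have h1 : (pvLoop pila []).reverse.Pairwise (· ≥ ·) :=
    List.pairwise_reverse.2 (by simpa using hls)
  exact List.Perm.eq_of_pairwise
    (fun a b _ _ hab hba => le_antisymm hba hab) h1 hss hperm
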